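-- pv_equiv track=rewrite | github.com/nicepyprod/csv-surgeon | csv_surgeon/diff.py | diff_rows
-- ===== SOURCE A (Python) =====
-- from typing import Iterator, Dict, List, Optional, Tuple
--
-- Row = Dict[str, str]
--
-- def _key(row: Row, key_cols: List[str]) -> Tuple:
--     return tuple(row.get(c, "") for c in key_cols)
--
-- def diff_rows(
--     left: Iterator[Row],
--     right: Iterator[Row],
--     key_cols: List[str],
-- ) -> Iterator[Row]:
--     """Yield rows with a '_diff' column: 'added', 'removed', or 'modified'."""
--     left_index: Dict[Tuple, Row] = {_key(r, key_cols): r for r in left}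
--     right_index: Dict[Tuple, Row] = {_key(r, key_cols): r for r in right}
--
--     all_keys = set(left_index) | set(right_index)
--     for k in sorted(all_keys, key=lambda t: t):
--         in_left = k in left_index
--         in_right = k in right_index
--         if in_left and not in_right:
--             yield {**left_index[k], "_diff": "removed"}
--         elif in_right and not in_left:
--             yield {**right_index[k], "_diff": "added"}
--         else:
--             l, r = left_index[k], right_index[k]
--             if l != r:
--                 yield {**r, "_diff": "modified"}
-- ===== SOURCE B (Python) =====
-- from typing import Iterator, Dict, List, Tuple
--
-- Row = Dict[str, str]
--
-- def _key(row: Row, key_cols: List[str]) -> Tuple: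
--     return tuple(row.get(c, "") for c in key_cols)
--
-- def diff_rows(
--     left: Iterator[Row],
--     right: Iterator[Row],
--     key_cols: List[str],
-- ) -> Iterator[Row]:
--     """Two-pointer merge over the two separately sorted key lists."""
--     left_index: Dict[Tuple, Row] = {_key(r, key_cols): r for r in left}
--     right_index: Dict[Tuple, Row] = {_key(r, key_cols): r for r in right}
--
--     lk = sorted(left_index)
--     rk = sorted(right_index)
--     i = j = 0
--     while i < len(lk) or j < len(rk):
--         if j == len(rk) or (i < len(lk) and lk[i] < rk[j]):
--             yield {**left_index[lk[i]], "_diff": "removed"}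
--             i += 1
--         elif i == len(lk) or rk[j] < lk[i]:
--             yield {**right_index[rk[j]], "_diff": "added"}
--             j += 1
--         else:
--             l, r = left_index[lk[i]], right_index[rk[j]]
--             if l != r:
--                 yield {**r, "_diff": "modified"}
--             i += 1
--             j += 1
-- ===== Notes on version B (the rewrite author's own statement) =====
-- stated objective: alternative
-- what changed: Replaces the union-set construction plus per-key membership tests of A's loop with two separately sorted key lists consumed by a two-pointer merge that classifies each key as removed/added/modified from the merge position alone.
import Mathlib
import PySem

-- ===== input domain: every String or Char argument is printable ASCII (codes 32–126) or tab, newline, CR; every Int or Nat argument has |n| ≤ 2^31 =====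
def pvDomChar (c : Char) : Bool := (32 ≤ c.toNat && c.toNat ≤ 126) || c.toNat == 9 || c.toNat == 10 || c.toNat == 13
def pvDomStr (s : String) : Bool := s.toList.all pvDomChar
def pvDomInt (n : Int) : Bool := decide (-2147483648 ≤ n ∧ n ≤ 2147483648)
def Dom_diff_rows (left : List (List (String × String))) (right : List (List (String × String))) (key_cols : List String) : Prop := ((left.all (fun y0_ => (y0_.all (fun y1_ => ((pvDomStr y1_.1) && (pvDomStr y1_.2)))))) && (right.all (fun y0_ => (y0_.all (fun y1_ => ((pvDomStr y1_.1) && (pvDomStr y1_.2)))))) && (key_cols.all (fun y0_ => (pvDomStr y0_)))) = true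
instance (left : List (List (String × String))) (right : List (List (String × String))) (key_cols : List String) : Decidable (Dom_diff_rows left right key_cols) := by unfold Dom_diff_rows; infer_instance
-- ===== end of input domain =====

-- B replaces A's union-set + per-key membership tests by a two-pointer merge of the two
-- separately sorted key lists (objective: alternative decomposition, same output).

-- ===== shared helpers (the module helper _key and the Python built-ins both programs use) =====
-- _key(row, key_cols): tuple(row.get(c, "") for c in key_cols)
def pvKey (row : List (String × String)) (key_cols : List String) : List String :=
  key_cols.map (fun c => (PySem.Dict.mk row).getD c "")

-- the dict comprehension  {_key(r, key_cols): r for r in rows}  (identical in both programs)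
def pvIndex (rows : List (List (String × String))) (key_cols : List String) :
    PySem.Dict (List String) (List (String × String)) :=
  rows.foldl (fun d r => d.insert (pvKey r key_cols) r) (PySem.Dict.mk [])

-- {**row, "_diff": tag}  (dict merge: overwrite "_diff" in place if present, else append)
def pvTag (row : List (String × String)) (tag : String) : List (String × String) :=
  ((PySem.Dict.mk row).insert "_diff" tag).items

-- Python's  l == r  on two dicts: equal as key→value mappings (exact for rows with
-- pairwise-distinct keys, i.e. every row that represents a Python dict)
def pvRowEq (l r : List (String × String)) : Bool :=
  l.length == r.length && l.all (fun p => (PySem.Dict.mk r).get? p.1 == some p.2)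

-- ===== PORT A =====
def diff_rows (left : List (List (String × String))) (right : List (List (String × String))) (key_cols : List String) : List (List (String × String)) :=
  let left_index := pvIndex left key_cols
  let right_index := pvIndex right key_cols
  let all_keys := PySem.Set.union (PySem.Set.ofList left_index.keys) (PySem.Set.ofList right_index.keys)
  (PySem.List.sorted all_keys (fun t => t)).flatMap (fun k =>
    let in_left := left_index.contains k
    let in_right := right_index.contains k
    if in_left && !in_right then [pvTag (left_index.getD k []) "removed"]
    else if in_right && !in_left then [pvTag (right_index.getD k []) "added"]
    else
      let l := left_index.getD k []
      let r := right_index.getD k []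
      if !(pvRowEq l r) then [pvTag r "modified"] else [])

-- ===== PORT B =====
-- the while-loop of Source B: two pointers over the two sorted key lists
def pvMergeRows (li ri : PySem.Dict (List String) (List (String × String))) :
    List (List String) → List (List String) → List (List (String × String))
  | [], [] => []
  | k :: lk, [] => pvTag (li.getD k []) "removed" :: pvMergeRows li ri lk []
  | [], k :: rk => pvTag (ri.getD k []) "added" :: pvMergeRows li ri [] rk
  | k :: lk, k' :: rk =>
    if k < k' then pvTag (li.getD k []) "removed" :: pvMergeRows li ri lk (k' :: rk)
    else if k' < k then pvTag (ri.getD k' []) "added" :: pvMergeRows li ri (k :: lk) rk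
    else (if !(pvRowEq (li.getD k []) (ri.getD k' [])) then [pvTag (ri.getD k' []) "modified"] else [])
           ++ pvMergeRows li ri lk rk
  termination_by lk rk => lk.length + rk.length

def diff_rows_alt (left : List (List (String × String))) (right : List (List (String × String))) (key_cols : List String) : List (List (String × String)) :=
  let left_index := pvIndex left key_cols
  let right_index := pvIndex right key_cols
  let lk := PySem.List.sorted left_index.keys (fun t => t)
  let rk := PySem.List.sorted right_index.keys (fun t => t)
  pvMergeRows left_index right_index lk rk

-- ===== PRECONDITION & SPEC =====
def Spec_diff_rows (left : List (List (String × String))) (right : List (List (String × String))) (key_cols : List String) (out : List (List (String × String))) : Prop := out = diff_rows_alt left right key_cols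
instance (left : List (List (String × String))) (right : List (List (String × String))) (key_cols : List String) (out : List (List (String × String))) : Decidable (Spec_diff_rows left right key_cols out) := by unfold Spec_diff_rows; infer_instance

-- ===== CLAIM (what is proved, stated in full; the proofs are below) =====
def Claim_equal_diff_rows : Prop := ∀ (left : List (List (String × String))) (right : List (List (String × String))) (key_cols : List String), Dom_diff_rows left right key_cols → Spec_diff_rows left right key_cols (diff_rows left right key_cols)

-- ===== LEMMAS AND PROOFS =====

-- A's loop body, named for the proofs
def pvStep (li ri : PySem.Dict (List String) (List (String × String))) (k : List String) :
    List (List (String × String)) :=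
  let in_left := li.contains k
  let in_right := ri.contains k
  if in_left && !in_right then [pvTag (li.getD k []) "removed"]
  else if in_right && !in_left then [pvTag (ri.getD k []) "added"]
  else
    let l := li.getD k []
    let r := ri.getD k []
    if !(pvRowEq l r) then [pvTag r "modified"] else []

-- sorted merge (dedup on equal heads) of the two key lists, for the proofs
def pvMergeKeys : List (List String) → List (List String) → List (List String)
  | [], rk => rk
  | lk, [] => lk
  | k :: lk, k' :: rk =>
    if k < k' then k :: pvMergeKeys lk (k' :: rk)
    else if k' < k then k' :: pvMergeKeys (k :: lk) rk
    else k :: pvMergeKeys lk rk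
  termination_by lk rk => lk.length + rk.length

lemma pv_diff_rows_eq (left right : List (List (String × String))) (key_cols : List String) :
    diff_rows left right key_cols =
      (PySem.List.sorted
        (PySem.Set.union (PySem.Set.ofList (pvIndex left key_cols).keys)
          (PySem.Set.ofList (pvIndex right key_cols).keys)) (fun t => t)).flatMap
        (pvStep (pvIndex left key_cols) (pvIndex right key_cols)) := rfl

lemma pv_diff_rows_alt_eq (left right : List (List (String × String))) (key_cols : List String) :
    diff_rows_alt left right key_cols =
      pvMergeRows (pvIndex left key_cols) (pvIndex right key_cols)
        (PySem.List.sorted (pvIndex left key_cols).keys (fun t => t))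
        (PySem.List.sorted (pvIndex right key_cols).keys (fun t => t)) := rfl

-- the sorting in both ports, re-expressed with the LinearOrder instances of the library lemmas
lemma pvSorted_inst (xs : List (List String)) :
    PySem.List.sorted xs (fun t : List String => t)
    = @PySem.List.sorted (List String) (List String) _
        (@LinearOrder.toDecidableLT _ List.instLinearOrder) xs (fun t => t) false := by
  congr 1

lemma pvDict_contains_iff {ν : Type} (d : PySem.Dict (List String) ν) (k : List String) :
    d.contains k = true ↔ k ∈ d.keys := by
  simp [PySem.Dict.contains, PySem.Dict.keys, List.any_eq_true, List.mem_map]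

lemma pvMergeKeys_mem (lk rk : List (List String)) (k : List String) :
    k ∈ pvMergeKeys lk rk ↔ k ∈ lk ∨ k ∈ rk := by
  induction lk, rk using pvMergeKeys.induct with
  | case1 rk => simp [pvMergeKeys]
  | case2 lk h => cases lk <;> simp [pvMergeKeys]
  | case3 a lk b rk h ih => simp [pvMergeKeys, h, ih]; tauto
  | case4 a lk b rk h h' ih => simp [pvMergeKeys, h, h', ih]; tauto
  | case5 a lk b rk h h' ih =>
    have heq : a = b := le_antisymm (not_lt.mp h') (not_lt.mp h)
    subst heq
    simp [pvMergeKeys, h, ih]; tauto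

lemma pvMergeKeys_pairwise (lk rk : List (List String))
    (hl : lk.Pairwise (· < ·)) (hr : rk.Pairwise (· < ·)) :
    (pvMergeKeys lk rk).Pairwise (· < ·) := by
  induction lk, rk using pvMergeKeys.induct with
  | case1 rk => simpa [pvMergeKeys] using hr
  | case2 lk h => cases lk <;> simpa [pvMergeKeys] using hl
  | case3 a lk b rk h ih =>
    rw [pvMergeKeys, if_pos h]
    refine List.pairwise_cons.mpr ⟨?_, ih hl.of_cons hr⟩
    intro x hx
    rcases (pvMergeKeys_mem _ _ x).mp hx with hx | hx
    · exact List.rel_of_pairwise_cons hl hx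
    · rcases List.mem_cons.mp hx with rfl | hx
      · exact h
      · exact lt_trans h (List.rel_of_pairwise_cons hr hx)
  | case4 a lk b rk h h' ih =>
    rw [pvMergeKeys, if_neg h, if_pos h']
    refine List.pairwise_cons.mpr ⟨?_, ih hl hr.of_cons⟩
    intro x hx
    rcases (pvMergeKeys_mem _ _ x).mp hx with hx | hx
    · rcases List.mem_cons.mp hx with rfl | hx
      · exact h'
      · exact lt_trans h' (List.rel_of_pairwise_cons hl hx)
    · exact List.rel_of_pairwise_cons hr hx
  | case5 a lk b rk h h' ih =>
    have hab : a = b := le_antisymm (not_lt.mp h') (not_lt.mp h)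
    subst hab
    rw [pvMergeKeys, if_neg h, if_neg h']
    refine List.pairwise_cons.mpr ⟨?_, ih hl.of_cons hr.of_cons⟩
    intro x hx
    rcases (pvMergeKeys_mem _ _ x).mp hx with hx | hx
    · exact List.rel_of_pairwise_cons hl hx
    · exact List.rel_of_pairwise_cons hr hx

lemma pvMerge_nil_left (li ri : PySem.Dict (List String) (List (String × String)))
    (rk : List (List String)) (hcr : ∀ k ∈ rk, ri.contains k = true)
    (hncl : ∀ k ∈ rk, li.contains k = false) :
    pvMergeRows li ri [] rk = rk.flatMap (pvStep li ri) := by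
  induction rk with
  | nil => rw [pvMergeRows]; simp
  | cons b rk ih =>
    rw [pvMergeRows, List.flatMap_cons]
    have hstep : pvStep li ri b = [pvTag (ri.getD b []) "added"] := by
      simp [pvStep, hcr b (by simp), hncl b (by simp)]
    rw [hstep]
    simp only [List.singleton_append, List.cons.injEq, true_and]
    exact ih (fun k hk => hcr k (by simp [hk])) (fun k hk => hncl k (by simp [hk]))

lemma pvMerge_nil_right (li ri : PySem.Dict (List String) (List (String × String)))
    (lk : List (List String)) (hcl : ∀ k ∈ lk, li.contains k = true)
    (hncr : ∀ k ∈ lk, ri.contains k = false) :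
    pvMergeRows li ri lk [] = lk.flatMap (pvStep li ri) := by
  induction lk with
  | nil => rw [pvMergeRows]; simp
  | cons a lk ih =>
    rw [pvMergeRows, List.flatMap_cons]
    have hstep : pvStep li ri a = [pvTag (li.getD a []) "removed"] := by
      simp [pvStep, hcl a (by simp), hncr a (by simp)]
    rw [hstep]
    simp only [List.singleton_append, List.cons.injEq, true_and]
    exact ih (fun k hk => hcl k (by simp [hk])) (fun k hk => hncr k (by simp [hk]))

-- the main loop correspondence: B's merge equals A's body flat-mapped over the merged key list
lemma pvMerge_eq_flatMap (li ri : PySem.Dict (List String) (List (String × String)))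
    (lk rk : List (List String)) :
    lk.Pairwise (· < ·) → rk.Pairwise (· < ·) →
    (∀ k ∈ lk, li.contains k = true) → (∀ k ∈ rk, ri.contains k = true) →
    (∀ k ∈ lk, (ri.contains k = true ↔ k ∈ rk)) →
    (∀ k ∈ rk, (li.contains k = true ↔ k ∈ lk)) →
    pvMergeRows li ri lk rk = (pvMergeKeys lk rk).flatMap (pvStep li ri) := by
  induction lk, rk using pvMergeKeys.induct with
  | case1 rk =>
    intro _ _ _ hcr _ hinvr
    rw [pvMergeKeys]
    refine pvMerge_nil_left li ri rk hcr (fun k hk => ?_)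
    have h := hinvr k hk
    simp at h
    exact h
  | case2 lk hlk =>
    intro hl _ hcl _ hinvl _
    have hmk : pvMergeKeys lk [] = lk := by cases lk <;> simp [pvMergeKeys]
    rw [hmk]
    refine pvMerge_nil_right li ri lk hcl (fun k hk => ?_)
    have h := hinvl k hk
    simp at h
    exact h
  | case3 a lk b rk hab ih =>
    intro hl hr hcl hcr hinvl hinvr
    rw [pvMergeRows, if_pos hab]
    rw [pvMergeKeys, if_pos hab, List.flatMap_cons]
    have ha : li.contains a = true := hcl a (by simp)
    have hra : ri.contains a = false := by
      rw [Bool.eq_false_iff]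
      intro hc
      have := (hinvl a (by simp)).mp hc
      rcases List.mem_cons.mp this with rfl | hmem
      · exact absurd hab (lt_irrefl _)
      · exact absurd (lt_trans hab (List.rel_of_pairwise_cons hr hmem)) (lt_irrefl _)
    have hstep : pvStep li ri a = [pvTag (li.getD a []) "removed"] := by
      simp [pvStep, ha, hra]
    rw [hstep]
    simp only [List.singleton_append, List.cons.injEq, true_and]
    refine ih hl.of_cons hr (fun k hk => hcl k (by simp [hk])) hcr
      (fun k hk => hinvl k (by simp [hk])) ?_
    intro k hk
    rw [hinvr k hk]
    constructor
    · intro h; rcases List.mem_cons.mp h with rfl | h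
      · exfalso
        rcases List.mem_cons.mp hk with rfl | hk'
        · exact absurd hab (lt_irrefl _)
        · exact absurd (lt_trans hab (List.rel_of_pairwise_cons hr hk')) (lt_irrefl _)
      · exact h
    · intro h; exact List.mem_cons_of_mem _ h
  | case4 a lk b rk hab hba ih =>
    intro hl hr hcl hcr hinvl hinvr
    rw [pvMergeRows, if_neg hab, if_pos hba]
    rw [pvMergeKeys, if_neg hab, if_pos hba, List.flatMap_cons]
    have hb : ri.contains b = true := hcr b (by simp)
    have hlb : li.contains b = false := by
      rw [Bool.eq_false_iff]
      intro hc
      have := (hinvr b (by simp)).mp hc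
      rcases List.mem_cons.mp this with rfl | hmem
      · exact absurd hba (lt_irrefl _)
      · exact absurd (lt_trans hba (List.rel_of_pairwise_cons hl hmem)) (lt_irrefl _)
    have hstep : pvStep li ri b = [pvTag (ri.getD b []) "added"] := by
      simp [pvStep, hb, hlb]
    rw [hstep]
    simp only [List.singleton_append, List.cons.injEq, true_and]
    refine ih hl hr.of_cons hcl (fun k hk => hcr k (by simp [hk])) ?_
      (fun k hk => hinvr k (by simp [hk]))
    intro k hk
    rw [hinvl k hk]
    constructor
    · intro h; rcases List.mem_cons.mp h with rfl | h
      · exfalso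
        rcases List.mem_cons.mp hk with rfl | hk'
        · exact absurd hba (lt_irrefl _)
        · exact absurd (lt_trans hba (List.rel_of_pairwise_cons hl hk')) (lt_irrefl _)
      · exact h
    · intro h; exact List.mem_cons_of_mem _ h
  | case5 a lk b rk hab hba ih =>
    have heq : a = b := le_antisymm (not_lt.mp hba) (not_lt.mp hab)
    subst heq
    intro hl hr hcl hcr hinvl hinvr
    rw [pvMergeRows, if_neg hab, if_neg hba]
    rw [pvMergeKeys, if_neg hab, if_neg hba, List.flatMap_cons]
    have ha : li.contains a = true := hcl a (by simp)
    have hra : ri.contains a = true := hcr a (by simp)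
    have hstep : pvStep li ri a =
        (if !(pvRowEq (li.getD a []) (ri.getD a [])) then [pvTag (ri.getD a []) "modified"]
         else []) := by
      simp [pvStep, ha, hra]
    rw [hstep]
    congr 1
    refine ih hl.of_cons hr.of_cons (fun k hk => hcl k (by simp [hk]))
      (fun k hk => hcr k (by simp [hk])) ?_ ?_
    · intro k hk
      rw [hinvl k (by simp [hk])]
      have hak : a < k := List.rel_of_pairwise_cons hl hk
      constructor
      · intro h; rcases List.mem_cons.mp h with rfl | h
        · exact absurd hak (lt_irrefl _)
        · exact h
      · intro h; exact List.mem_cons_of_mem _ h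
    · intro k hk
      rw [hinvr k (by simp [hk])]
      have hak : a < k := List.rel_of_pairwise_cons hr hk
      constructor
      · intro h; rcases List.mem_cons.mp h with rfl | h
        · exact absurd hak (lt_irrefl _)
        · exact h
      · intro h; exact List.mem_cons_of_mem _ h

lemma pvIndex_keys_nodup (rows : List (List (String × String))) (key_cols : List String) :
    (pvIndex rows key_cols).keys.Nodup := by
  unfold pvIndex
  exact PySem.Dict.nodup_keys_foldl_insert_key rows (fun r => pvKey r key_cols)
    (fun _ r => r) (PySem.Dict.mk []) (by simp [PySem.Dict.keys])

lemma pvSortedKeys_mem (d : PySem.Dict (List String) (List (String × String))) (k : List String) :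
    k ∈ PySem.List.sorted d.keys (fun t => t) ↔ k ∈ d.keys :=
  (PySem.List.sorted_perm d.keys (fun t => t) false).mem_iff

lemma pvSortedKeys_pairwise (d : PySem.Dict (List String) (List (String × String)))
    (hnd : d.keys.Nodup) :
    (PySem.List.sorted d.keys (fun t => t)).Pairwise (· < ·) := by
  rw [pvSorted_inst]
  have hle := PySem.List.sorted_pairwise (κ := List String) d.keys (fun t => t)
  have hnd' : (@PySem.List.sorted (List String) (List String) _
      (@LinearOrder.toDecidableLT _ List.instLinearOrder) d.keys (fun t => t) false).Nodup :=
    (@PySem.List.sorted_perm (List String) (List String) _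
      (@LinearOrder.toDecidableLT _ List.instLinearOrder) d.keys (fun t => t) false).nodup_iff.mpr hnd
  have hne : List.Pairwise (fun a b : List String => a ≠ b) _ := hnd'
  exact (hle.and hne).imp (fun h => lt_of_le_of_ne h.1 h.2)

-- ===== VERDICT (by name: the statement is the Claim_ definition above) =====
theorem diff_rows_spec : Claim_equal_diff_rows := by
  intro left right key_cols _
  unfold Spec_diff_rows
  rw [pv_diff_rows_eq, pv_diff_rows_alt_eq]
  have hndl := pvIndex_keys_nodup left key_cols
  have hndr := pvIndex_keys_nodup right key_cols
  have hpl := pvSortedKeys_pairwise (pvIndex left key_cols) hndl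
  have hpr := pvSortedKeys_pairwise (pvIndex right key_cols) hndr
  have hunion : PySem.List.sorted
      (PySem.Set.union (PySem.Set.ofList (pvIndex left key_cols).keys)
        (PySem.Set.ofList (pvIndex right key_cols).keys)) (fun t => t)
      = pvMergeKeys (PySem.List.sorted (pvIndex left key_cols).keys (fun t => t))
          (PySem.List.sorted (pvIndex right key_cols).keys (fun t => t)) := by
    rw [pvSorted_inst]
    apply PySem.List.sorted_eq_of_perm_of_pairwise_lt
    · rw [List.perm_ext_iff_of_nodup]
      · intro k
        rw [pvMergeKeys_mem, pvSortedKeys_mem, pvSortedKeys_mem]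
        unfold PySem.Set.union
        rw [PySem.Set.mem_update, PySem.Set.mem_ofList, PySem.Set.mem_ofList]
      · exact ((pvMergeKeys_pairwise _ _ hpl hpr).imp (fun h => ne_of_lt h))
      · exact PySem.Set.nodup_update _ _ (PySem.Set.nodup_ofList _)
    · exact pvMergeKeys_pairwise _ _ hpl hpr
  rw [hunion]
  exact (pvMerge_eq_flatMap (pvIndex left key_cols) (pvIndex right key_cols) _ _ hpl hpr
    (fun k hk => (pvDict_contains_iff _ k).mpr ((pvSortedKeys_mem _ k).mp hk))
    (fun k hk => (pvDict_contains_iff _ k).mpr ((pvSortedKeys_mem _ k).mp hk))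
    (fun k _ => by rw [pvDict_contains_iff, pvSortedKeys_mem])
    (fun k _ => by rw [pvDict_contains_iff, pvSortedKeys_mem])).symm
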